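-- pv_equiv track=rewrite | github.com/LimeHubs/stream-fusion | stream_fusion/utils/utopeer/utopeer_service.py | _most_distinctive_variant
-- ===== SOURCE A (Python) =====
-- def _most_distinctive_variant(variants: list[str]) -> str:
--     """
--     Pick the most search-effective single variant for Phase 3 (no category filter).
--
--       1. 2-3 word variants ≥ 8 chars (concise but specific):
--            "No Way Home", "Impossible Dead Reckoning", "Andor S01"
--       2. Single-word variants ≥ 5 chars:
--            "Andor", "Inception"
--       3. Last variant as final fallback
--     """
--     multi = [v for v in variants if 2 <= len(v.split()) <= 3 and len(v) >= 8]
--     if multi: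
--         return min(multi, key=len)
--     single = [v for v in variants if len(v.split()) == 1 and len(v) >= 5]
--     if single:
--         return min(single, key=len)
--     return variants[-1] if variants else ""
-- ===== SOURCE B (Python) =====
-- def _most_distinctive_variant(variants: list[str]) -> str:
--     # Sort once by length (stable), then scan: the first hit in length order
--     # is automatically the shortest (earliest among ties).
--     by_len = sorted(variants, key=len)
--     for v in by_len:
--         if 2 <= len(v.split()) <= 3 and len(v) >= 8:
--             return v
--     for v in by_len:
--         if len(v.split()) == 1 and len(v) >= 5:
--             return v
--     return variants[-1] if variants else ""
-- ===== Notes on version B (the rewrite author's own statement) =====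
-- stated objective: alternative
-- what changed: Replaced filter-then-min(..., key=len) with sort-then-scan: the list is stably sorted by length once, and the result is the first variant in that order passing each tier's test (stability reproduces min's first-occurrence tie-breaking).
import Mathlib
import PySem

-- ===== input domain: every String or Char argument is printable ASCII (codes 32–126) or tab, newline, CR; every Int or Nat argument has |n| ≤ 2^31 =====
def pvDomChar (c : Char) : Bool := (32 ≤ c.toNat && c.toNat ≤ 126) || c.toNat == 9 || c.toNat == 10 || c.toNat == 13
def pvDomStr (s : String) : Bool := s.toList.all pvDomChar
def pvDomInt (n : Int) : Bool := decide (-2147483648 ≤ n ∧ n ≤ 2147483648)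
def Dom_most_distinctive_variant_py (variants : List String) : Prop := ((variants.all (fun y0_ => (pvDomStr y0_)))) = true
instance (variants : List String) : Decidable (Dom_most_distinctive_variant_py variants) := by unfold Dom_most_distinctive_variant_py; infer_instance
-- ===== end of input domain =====

-- B sorts the list stably by length once and returns the first variant of each tier
-- in that order (sort-then-scan instead of filter-then-min); same results.

-- ===== PORT A =====
def most_distinctive_variant_py (variants : List String) : String :=
  let multi := variants.filter (fun v =>
    decide (2 ≤ (PySem.Str.split₀ v).length ∧ (PySem.Str.split₀ v).length ≤ 3 ∧ 8 ≤ PySem.Str.len v))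
  match PySem.List.min? multi (fun v => PySem.Str.len v) with
  | some m => m
  | none =>
    let single := variants.filter (fun v =>
      decide ((PySem.Str.split₀ v).length = 1 ∧ 5 ≤ PySem.Str.len v))
    match PySem.List.min? single (fun v => PySem.Str.len v) with
    | some m => m
    | none =>
      match PySem.List.pyGet? variants (-1) with
      | some v => v
      | none => ""

-- ===== PORT B =====
def most_distinctive_variant_py_alt (variants : List String) : String :=
  let byLen := PySem.List.sorted variants (fun v => PySem.Str.len v) false
  -- first for-loop with early return
  match byLen.find? (fun v =>
    decide (2 ≤ (PySem.Str.split₀ v).length ∧ (PySem.Str.split₀ v).length ≤ 3 ∧ 8 ≤ PySem.Str.len v)) with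
  | some v => v
  | none =>
    -- second for-loop with early return
    match byLen.find? (fun v =>
      decide ((PySem.Str.split₀ v).length = 1 ∧ 5 ≤ PySem.Str.len v)) with
    | some v => v
    | none => (variants.getLast?).getD ""

-- ===== PRECONDITION & SPEC =====
def Spec_most_distinctive_variant_py (variants : List String) (out : String) : Prop := out = most_distinctive_variant_py_alt variants
instance (variants : List String) (out : String) : Decidable (Spec_most_distinctive_variant_py variants out) := by unfold Spec_most_distinctive_variant_py; infer_instance

-- ===== CLAIM (what is proved, stated in full; the proofs are below) =====
def Claim_equal_most_distinctive_variant_py : Prop := ∀ (variants : List String), Dom_most_distinctive_variant_py variants → Spec_most_distinctive_variant_py variants (most_distinctive_variant_py variants)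

-- ===== LEMMAS AND PROOFS =====

-- scanning insertBy x l (l key-sorted) for the first q-hit = running-min step on the scan of l
theorem pv_find?_insertBy {α : Type} (key : α → Int) (q : α → Bool) (x : α) (l : List α)
    (hl : l.Pairwise (fun a b => key a ≤ key b)) :
    List.find? q (PySem.List.insertBy (fun a b => decide (key a < key b)) x l)
      = if q x then
          (match List.find? q l with
           | none => some x
           | some m => if key x < key m then some x else some m)
        else List.find? q l := by
  induction l with
  | nil =>
    by_cases hq : q x <;> simp [PySem.List.insertBy, List.find?, hq]
  | cons y ys ih =>
    rcases List.pairwise_cons.mp hl with ⟨hy, hys⟩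
    by_cases hlt : key x < key y
    · -- x inserted at the front
      have : PySem.List.insertBy (fun a b => decide (key a < key b)) x (y :: ys)
          = x :: y :: ys := by simp [PySem.List.insertBy, hlt]
      rw [this]
      by_cases hq : q x
      · have hfront : List.find? q (x :: y :: ys) = some x := by simp [List.find?, hq]
        rw [hfront, if_pos hq]
        cases hfy : List.find? q (y :: ys) with
        | none => rfl
        | some m =>
          have hm : m ∈ y :: ys := List.mem_of_find?_eq_some hfy
          have hym : key y ≤ key m := by
            rcases List.mem_cons.mp hm with rfl | hm2
            · exact le_refl _
            · exact hy m hm2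
          simp [lt_of_lt_of_le hlt hym]
      · simp [List.find?, hq]
    · -- x goes past y
      have : PySem.List.insertBy (fun a b => decide (key a < key b)) x (y :: ys)
          = y :: PySem.List.insertBy (fun a b => decide (key a < key b)) x ys := by
        simp [PySem.List.insertBy, hlt]
      rw [this]
      by_cases hqy : q y
      · have h1 : List.find? q (y :: PySem.List.insertBy (fun a b => decide (key a < key b)) x ys)
            = some y := by simp [List.find?, hqy]
        have h2 : List.find? q (y :: ys) = some y := by simp [List.find?, hqy]
        rw [h1, h2]
        by_cases hq : q x
        · simp [hq, if_neg hlt]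
        · simp [hq]
      · have h1 : List.find? q (y :: PySem.List.insertBy (fun a b => decide (key a < key b)) x ys)
            = List.find? q (PySem.List.insertBy (fun a b => decide (key a < key b)) x ys) := by
          simp [List.find?, hqy]
        have h2 : List.find? q (y :: ys) = List.find? q ys := by simp [List.find?, hqy]
        rw [h1, h2, ih hys]

-- first q-hit of the stable length-sort = first minimum-length q-element (A's min over the filter)
theorem pv_find?_sorted_eq_min?_filter {α : Type} (key : α → Int) (q : α → Bool) (xs : List α) :
    List.find? q (PySem.List.sorted xs key false)
      = PySem.List.min? (xs.filter q) key := by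
  induction xs using List.reverseRecOn with
  | nil => rfl
  | append_singleton ys x ih =>
    have hsorted : PySem.List.sorted (ys ++ [x]) key false
        = PySem.List.insertBy (fun a b => decide (key a < key b)) x
            (PySem.List.sorted ys key false) := by
      rw [PySem.List.sorted_eq_foldl_insertBy, PySem.List.sorted_eq_foldl_insertBy,
        List.foldl_append]
      rfl
    have hpw : (PySem.List.sorted ys key false).Pairwise (fun a b => key a ≤ key b) :=
      PySem.List.sorted_pairwise ys key
    rw [hsorted, pv_find?_insertBy key q x _ hpw, ih]
    by_cases hq : q x
    · have : (ys ++ [x]).filter q = ys.filter q ++ [x] := by simp [List.filter_append, hq]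
      rw [this, if_pos hq]
      show _ = List.foldl _ none (ys.filter q ++ [x])
      rw [List.foldl_append]
      rfl
    · have : (ys ++ [x]).filter q = ys.filter q := by simp [List.filter_append, hq]
      rw [this, if_neg hq]

-- ===== VERDICT (by name: the statement is the Claim_ definition above) =====
theorem most_distinctive_variant_py_spec : Claim_equal_most_distinctive_variant_py := by
  intro variants _
  unfold Spec_most_distinctive_variant_py most_distinctive_variant_py most_distinctive_variant_py_alt
  dsimp only
  rw [pv_find?_sorted_eq_min?_filter, pv_find?_sorted_eq_min?_filter]
  rw [PySem.List.pyGet?_neg_one]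
  cases PySem.List.min? (variants.filter fun v =>
      decide (2 ≤ (PySem.Str.split₀ v).length ∧ (PySem.Str.split₀ v).length ≤ 3 ∧ 8 ≤ PySem.Str.len v))
      (fun v => PySem.Str.len v) with
  | some m => rfl
  | none =>
    cases PySem.List.min? (variants.filter fun v =>
        decide ((PySem.Str.split₀ v).length = 1 ∧ 5 ≤ PySem.Str.len v))
        (fun v => PySem.Str.len v) with
    | some s => rfl
    | none => cases variants.getLast? <;> rfl
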